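-- pv_equiv track=rewrite | github.com/abbottyanginchina/FL_Shapley_pytorch | utils/helpers.py | aggListOfDicts
-- ===== SOURCE A (Python) =====
-- def aggListOfDicts(lst):
--     '''
--         Combines a list of dictionaries into a dictionary of lists
--     '''
--     agg = {}
--     for dct in lst:
--         for name, val in dct.items():
--             if name in agg:
--                 agg[name] += [val]
--             else:
--                 agg[name] = [val]
--
--     return agg
-- ===== SOURCE B (Python) =====
-- def aggListOfDicts(lst):
--     '''
--         Combines a list of dictionaries into a dictionary of lists
--     '''
--     order = dict.fromkeys(k for d in lst for k in d)
--     return {name: [d[name] for d in lst if name in d] for name in order}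
-- ===== Notes on version B (the rewrite author's own statement) =====
-- stated objective: alternative
-- what changed: Replaces A's row-major accumulate-as-you-go loop (append to the growing dict entry per pair) with a two-phase index-build-then-column-gather: first collect the distinct keys in first-appearance order via dict.fromkeys, then build each key's value list with one filtered scan over the input; Pre_ only excludes assoc-list inputs whose inner dicts carry duplicate keys, which a real Python dict argument cannot.
import Mathlib
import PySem

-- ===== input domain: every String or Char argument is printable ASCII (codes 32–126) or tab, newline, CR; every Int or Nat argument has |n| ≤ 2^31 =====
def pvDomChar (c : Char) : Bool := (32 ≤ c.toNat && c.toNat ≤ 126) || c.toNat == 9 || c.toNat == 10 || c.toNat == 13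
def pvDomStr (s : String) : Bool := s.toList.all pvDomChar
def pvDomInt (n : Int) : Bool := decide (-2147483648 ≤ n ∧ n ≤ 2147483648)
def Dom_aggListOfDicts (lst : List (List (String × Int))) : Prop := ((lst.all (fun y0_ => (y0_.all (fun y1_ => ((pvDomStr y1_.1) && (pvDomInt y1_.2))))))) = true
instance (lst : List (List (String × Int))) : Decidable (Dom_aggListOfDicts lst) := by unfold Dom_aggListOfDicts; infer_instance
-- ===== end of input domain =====

-- B replaces A's accumulate-as-you-go dict loop with a two-phase index-build-then-column-gather (alternative decomposition, similar cost).


-- ===== PORT A =====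
-- agg = {}; for dct in lst: for name, val in dct.items(): if name in agg: agg[name] += [val] else: agg[name] = [val]; return agg
def aggListOfDicts (lst : List (List (String × Int))) : List (String × List Int) :=
  (lst.foldl (fun agg dct =>
      dct.foldl (fun agg p =>
        if agg.contains p.1 then agg.insert p.1 (agg.getD p.1 [] ++ [p.2])
        else agg.insert p.1 [p.2]) agg)
    (PySem.Dict.empty : PySem.Dict String (List Int))).items

-- ===== PORT B =====
-- order = dict.fromkeys(k for d in lst for k in d); return {name: [d[name] for d in lst if name in d] for name in order}
def aggListOfDicts_alt (lst : List (List (String × Int))) : List (String × List Int) :=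
  let order := PySem.List.dedup (lst.flatMap (fun d => d.map (·.1)))
  order.map (fun name => (name, lst.filterMap (fun d => (PySem.Dict.mk d).get? name)))

-- ===== PRECONDITION & SPEC =====
-- Pre_ excludes only inner assoc lists with duplicate keys: a Python dict argument cannot carry
-- duplicate keys, so these Lean inputs represent no dict A is ever called on.
def Pre_aggListOfDicts (lst : List (List (String × Int))) : Prop :=
  ∀ d ∈ lst, (d.map Prod.fst).Nodup
instance (lst : List (List (String × Int))) : Decidable (Pre_aggListOfDicts lst) := by unfold Pre_aggListOfDicts; infer_instance
def pvWitness_aggListOfDicts : (List (List (String × Int))) := [[("a", 1), ("b", 2)], [("a", 3)]]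
def Spec_aggListOfDicts (lst : List (List (String × Int))) (out : List (String × List Int)) : Prop := out = aggListOfDicts_alt lst
instance (lst : List (List (String × Int))) (out : List (String × List Int)) : Decidable (Spec_aggListOfDicts lst out) := by unfold Spec_aggListOfDicts; infer_instance

-- ===== CLAIM (what is proved, stated in full; the proofs are below) =====
def Claim_equal_aggListOfDicts : Prop := ∀ (lst : List (List (String × Int))), Dom_aggListOfDicts lst → Pre_aggListOfDicts lst → Spec_aggListOfDicts lst (aggListOfDicts lst)

-- ===== LEMMAS AND PROOFS =====

-- A's branching step is the uniform 'modify append' step.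
lemma step_eq_modify (agg : PySem.Dict String (List Int)) (p : String × Int) :
    (if agg.contains p.1 then agg.insert p.1 (agg.getD p.1 [] ++ [p.2])
     else agg.insert p.1 [p.2]) = agg.modify p.1 [] (· ++ [p.2]) := by
  by_cases h : agg.contains p.1
  · simp [h, PySem.Dict.modify]
  · rw [PySem.Dict.modify, PySem.Dict.getD_of_not_contains agg [] (by simp [h])]
    simp [h]

-- In a dict with distinct keys, the pairs with key k are exactly the looked-up value.
lemma filter_key_eq_get? (k : String) :
    ∀ (d : List (String × Int)), (d.map Prod.fst).Nodup →
      ((d.filter (fun p => p.1 == k)).map (·.2)) = ((PySem.Dict.mk d).get? k).toList := by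
  intro d hnd
  induction d with
  | nil => simp [PySem.Dict.get?]
  | cons q d' ih =>
    simp only [List.map_cons, List.nodup_cons] at hnd
    rw [PySem.Dict.get?_mk_cons]
    by_cases h : q.1 = k
    · have hnil : d'.filter (fun p => p.1 == k) = [] := by
        apply List.filter_eq_nil_iff.mpr
        intro p hp
        simp only [beq_iff_eq]
        intro hk
        exact hnd.1 (h ▸ hk ▸ List.mem_map_of_mem hp)
      simp [h, hnil]
    · simp [h, beq_iff_eq, ih hnd.2]

-- Column gather: filtering the flattened pairs = per-dict lookup.
lemma gather_eq (k : String) :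
    ∀ (lst : List (List (String × Int))), (∀ d ∈ lst, (d.map Prod.fst).Nodup) →
      ((lst.flatten.filter (fun p => p.1 == k)).map (·.2))
        = lst.filterMap (fun d => (PySem.Dict.mk d).get? k) := by
  intro lst hnd
  induction lst with
  | nil => simp
  | cons d rest ih =>
    have h1 := filter_key_eq_get? k d (hnd d (by simp))
    have h2 := ih (fun d' hd' => hnd d' (by simp [hd']))
    simp only [List.flatten_cons, List.filter_append, List.map_append, h1, h2,
      List.filterMap_cons]
    cases h : (PySem.Dict.mk d).get? k <;> simp

theorem aggListOfDicts_spec : Claim_equal_aggListOfDicts := by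
  intro lst _ hpre
  unfold Spec_aggListOfDicts aggListOfDicts aggListOfDicts_alt
  -- fuse the nested loop into one fold over the flattened pair list
  have hfuse : lst.foldl (fun agg dct =>
      dct.foldl (fun agg p =>
        if agg.contains p.1 then agg.insert p.1 (agg.getD p.1 [] ++ [p.2])
        else agg.insert p.1 [p.2]) agg)
      (PySem.Dict.empty : PySem.Dict String (List Int))
      = lst.flatten.foldl (fun agg p => agg.modify p.1 [] (· ++ [p.2])) PySem.Dict.empty := by
    rw [List.foldl_flatten]
    apply PySem.List.foldl_congr_mem
    intro agg dct _
    exact PySem.List.foldl_congr_mem dct _ _ agg (fun acc p _ => step_eq_modify acc p)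
  rw [hfuse]
  set D := lst.flatten.foldl (fun agg p => agg.modify p.1 [] (· ++ [p.2]))
    (PySem.Dict.empty : PySem.Dict String (List Int)) with hD
  have hkeys : D.keys = PySem.List.dedup (lst.flatMap (fun d => d.map (·.1))) := by
    rw [hD, PySem.Dict.keys_foldl_modify_key (key := Prod.fst)]
    simp [List.flatMap_def, List.map_flatten]
    rfl
  have hnd : D.keys.Nodup := by
    rw [hkeys]; exact PySem.List.nodup_dedup _
  rw [PySem.Dict.items_eq_map_keys D hnd [], hkeys]
  apply List.map_congr_left
  intro k _
  have := PySem.Dict.getD_foldl_modify_append (l := lst.flatten)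
    (d := (PySem.Dict.empty : PySem.Dict String (List Int))) (c := k)
  rw [hD, this, PySem.Dict.getD_empty]
  simp only [List.nil_append]
  rw [gather_eq k lst hpre]
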